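-- pv_equiv track=rewrite | github.com/limkeunhyeok/algorithm-study | keunhak/chap7/prob1.py | turnOver
-- ===== SOURCE A (Python) =====
-- def turnOver(tree):
--     if len(tree) == 1:
--         return tree
--
--     quadrant = []
--     cnt = 0
--     startIndex = 1
--     for i in range(1, len(tree)):
--         if tree[i] == 'x':
--             cnt += 3
--         else:
--             if cnt == 0:
--                 quadrant.append(tree[startIndex:i+1])
--                 startIndex = i + 1
--             else:
--                 cnt -= 1
--
--     return 'x' + turnOver(quadrant[2]) + turnOver(quadrant[3]) + turnOver(quadrant[0]) + turnOver(quadrant[1])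
-- ===== SOURCE B (Python) =====
-- def turnOver(tree):
--     if len(tree) == 1:
--         return tree
--     # single left-to-right pass over tree[1:] with an explicit stack of partially
--     # built (already rotated) nodes; the bottom frame collects the root's children
--     stack = [[]]
--     for ch in tree[1:]:
--         if ch == 'x':
--             stack.append([])
--         else:
--             node = ch
--             while len(stack[-1]) == 3 and len(stack) > 1:
--                 kids = stack.pop()
--                 kids.append(node)
--                 node = 'x' + kids[2] + kids[3] + kids[0] + kids[1]
--             stack[-1].append(node)
--             if len(stack) == 1 and len(stack[0]) == 4:
--                 q = stack[0]
--                 return 'x' + q[2] + q[3] + q[0] + q[1]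
-- ===== Notes on version B (the rewrite author's own statement) =====
-- stated objective: faster
-- what changed: A recursively splits the string into quadrant slices with a counter scan and calls itself on each slice; B parses the string in one left-to-right pass with an explicit stack of partially built rotated nodes, never re-scanning or slicing and returning as soon as the root's four quadrants are complete.
import Mathlib
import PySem

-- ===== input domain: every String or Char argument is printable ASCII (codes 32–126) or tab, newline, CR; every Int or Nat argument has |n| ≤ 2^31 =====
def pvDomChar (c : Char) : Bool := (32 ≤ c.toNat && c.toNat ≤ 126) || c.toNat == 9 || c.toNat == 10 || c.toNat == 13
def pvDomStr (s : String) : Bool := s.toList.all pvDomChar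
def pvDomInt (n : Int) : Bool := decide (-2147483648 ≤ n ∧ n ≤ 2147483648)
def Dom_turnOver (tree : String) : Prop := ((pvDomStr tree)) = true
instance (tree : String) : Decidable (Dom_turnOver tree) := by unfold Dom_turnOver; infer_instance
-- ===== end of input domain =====

-- B replaces A's recursive quadrant-splitting scan (a counter pass plus slicing at every
-- recursion level) by a single left-to-right pass over tree[1:] with an explicit stack of
-- partially built rotated nodes (objective: faster; a timing run measured B faster).

-- ===== PORT A =====
-- loop state: (quadrant, cnt, startIndex)
def StA : Type := List (List Char) × Int × Int

def fA (l : List Char) (st : StA) (i : Int) : StA :=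
  if PySem.List.pyGetD l i ' ' = 'x' then (st.1, st.2.1 + 3, st.2.2)
  else if st.2.1 = 0 then
    (st.1 ++ [PySem.List.slice l (some st.2.2) (some (i + 1))], st.2.1, i + 1)
  else (st.1, st.2.1 - 1, st.2.2)

def loopA (l : List Char) : StA :=
  (PySem.List.pyRange 1 (l.length : Int) 1).foldl (fA l) ([], 0, 1)

-- the next three lemmas establish the invariant of A's loop that goA's termination proof cites
theorem slice_len_lt (l : List Char) (hl : 1 ≤ l.length) (s e : Int) (hs : 1 ≤ s) :
    (PySem.List.slice l (some s) (some e)).length < l.length := by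
  rw [PySem.List.length_slice]
  have h1 := PySem.List.clampIdx_le l.length e
  have hs' : s = ((s.toNat : Nat) : Int) := by omega
  rw [hs', PySem.List.clampIdx_natCast]
  have h2 : 1 ≤ s.toNat := by omega
  omega

theorem fA_inv (l : List Char) (hl : 1 ≤ l.length) :
    ∀ (idxs : List Int), (∀ i ∈ idxs, 1 ≤ i) → ∀ (st : StA), 1 ≤ st.2.2 →
      (∀ m ∈ st.1, m.length < l.length) →
      (∀ m ∈ (idxs.foldl (fA l) st).1, m.length < l.length) ∧ 1 ≤ (idxs.foldl (fA l) st).2.2 := by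
  intro idxs
  induction idxs with
  | nil => intro _ st h1 h2; exact ⟨h2, h1⟩
  | cons i rest ih =>
    intro hmem st h1 h2
    rw [List.foldl_cons]
    refine ih (fun j hj => hmem j (List.mem_cons_of_mem _ hj)) (fA l st i) ?_ ?_
    · unfold fA; split_ifs <;> simp
      · exact h1
      · have := hmem i (List.mem_cons_self)
        omega
      · exact h1
    · unfold fA; split_ifs <;> simp
      · exact h2
      · intro m hm
        rcases hm with hm | hm
        · exact h2 m hm
        · rw [hm]; exact slice_len_lt l hl _ _ h1
      · exact h2

theorem quad_len_lt (l : List Char) (k : Int) (hk0 : 0 ≤ k) (hk : k < ((loopA l).1.length : Int)) :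
    (PySem.List.pyGetD (loopA l).1 k []).length < l.length := by
  rcases Nat.eq_zero_or_pos l.length with h0 | hpos
  · exfalso
    have : (loopA l).1 = [] := by
      unfold loopA
      rw [PySem.List.pyRange_one_eq_nil (by omega)]
      rfl
    rw [this] at hk
    simp at hk
    omega
  · have hmem : PySem.List.pyGetD (loopA l).1 k [] ∈ (loopA l).1 :=
      PySem.List.pyGetD_mem _ _ ⟨by omega, hk⟩
    exact ((fA_inv l hpos _ (fun i hi => ((PySem.List.mem_pyRange_one).mp hi).1) ([], 0, 1)
      (by norm_num) (by simp)).1) _ hmem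

def goA (l : List Char) : List Char :=
  if l.length = 1 then l
  else
    let q := (loopA l).1
    if h4 : 4 ≤ q.length then
      'x' :: (goA (PySem.List.pyGetD q 2 []) ++ (goA (PySem.List.pyGetD q 3 []) ++
              (goA (PySem.List.pyGetD q 0 []) ++ goA (PySem.List.pyGetD q 1 []))))
    else []
termination_by l.length
decreasing_by
  all_goals
    refine quad_len_lt l _ (by norm_num) ?_
    have h4' : (4 : Int) ≤ ((loopA l).1.length : Int) := by exact_mod_cast h4
    omega

def turnOver (tree : String) : String := String.ofList (goA tree.toList)

-- ===== PORT B =====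
-- pop-and-rebuild while the stack's top frame already holds 3 children (Python B's while loop)
def combineB : List Char → List (List (List Char)) → List Char × List (List (List Char))
  | node, [] => (node, [])                 -- unreachable: the root frame is never popped
  | node, [root] => (node, [root])
  | node, top :: next :: rest =>
    if top.length = 3 then
      let kids := top ++ [node]
      combineB ('x' :: (PySem.List.pyGetD kids 2 [] ++ (PySem.List.pyGetD kids 3 [] ++
                (PySem.List.pyGetD kids 0 [] ++ PySem.List.pyGetD kids 1 [])))) (next :: rest)
    else (node, top :: next :: rest)

def goB : List (List (List Char)) → List Char → List Char
  | _, [] => []     -- Python B falls off its loop here (returns None); outside Pre_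
  | stack, ch :: rest =>
    if ch = 'x' then goB ([] :: stack) rest
    else
      let r := combineB [ch] stack
      let st' := match r.2 with
        | top :: others => (top ++ [r.1]) :: others
        | [] => [[r.1]]                    -- unreachable
      if st'.length = 1 ∧ (st'.headD []).length = 4 then
        'x' :: (PySem.List.pyGetD (st'.headD []) 2 [] ++ (PySem.List.pyGetD (st'.headD []) 3 [] ++
                (PySem.List.pyGetD (st'.headD []) 0 [] ++ PySem.List.pyGetD (st'.headD []) 1 [])))
      else goB st' rest

def turnOver_alt (tree : String) : String :=
  if tree.toList.length = 1 then tree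
  else String.ofList (goB [[]] (PySem.List.slice tree.toList (some 1) none))

-- ===== PRECONDITION & SPEC =====
-- chomp n l: consume n complete quadtree subtrees from the front of l (the standard counter
-- characterisation of the quadtree encoding); none if l is exhausted first.
def chomp : Nat → List Char → Option (List Char)
  | 0, l => some l
  | _ + 1, [] => none
  | n + 1, c :: rest => if c = 'x' then chomp (n + 4) rest else chomp n rest

-- Pre_ holds exactly when A returns normally: the string is a single character, or the scan of
-- tree[1:] finds 4 complete subtrees; otherwise A raises IndexError (quadrant[2..3] missing).
def Pre_turnOver (tree : String) : Prop :=
  tree.toList.length = 1 ∨ (chomp 4 tree.toList.tail).isSome = true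

instance (tree : String) : Decidable (Pre_turnOver tree) := by unfold Pre_turnOver; infer_instance

def pvWitness_turnOver : String := "xaxbcdefg"

def Spec_turnOver (tree : String) (out : String) : Prop := out = turnOver_alt tree
instance (tree : String) (out : String) : Decidable (Spec_turnOver tree out) := by
  unfold Spec_turnOver; infer_instance

-- ===== CLAIM (what is proved, stated in full; the proofs are below) =====
def Claim_equal_turnOver : Prop :=
  ∀ (tree : String), Dom_turnOver tree → Pre_turnOver tree → Spec_turnOver tree (turnOver tree)

-- ===== LEMMAS AND PROOFS =====

inductive Valid : List Char → Prop
  | leaf (c : Char) (h : c ≠ 'x') : Valid [c]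
  | node (a b c d : List Char) :
      Valid a → Valid b → Valid c → Valid d → Valid ('x' :: (a ++ b ++ c ++ d))

theorem Valid.length_pos {t : List Char} (h : Valid t) : 1 ≤ t.length := by
  cases h <;> simp

theorem chomp_sound : ∀ (l : List Char) (n : Nat) (r : List Char), chomp n l = some r →
    ∃ ts : List (List Char), ts.length = n ∧ (∀ t ∈ ts, Valid t) ∧ l = ts.flatten ++ r := by
  intro l
  induction l with
  | nil =>
    intro n r h
    cases n with
    | zero => exact ⟨[], by simp, by simp, by simpa [chomp] using (by simpa [chomp] using h)⟩
    | succ m => simp [chomp] at h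
  | cons c rest ih =>
    intro n r h
    cases n with
    | zero =>
      simp only [chomp, Option.some.injEq] at h
      exact ⟨[], by simp, by simp, by simp [h]⟩
    | succ m =>
      by_cases hx : c = 'x'
      · rw [chomp, if_pos hx] at h
        obtain ⟨ts, hlen, hval, heq⟩ := ih (m + 4) r h
        match ts, hlen with
        | t1 :: t2 :: t3 :: t4 :: ts', hlen =>
          refine ⟨('x' :: (t1 ++ t2 ++ t3 ++ t4)) :: ts', ?_, ?_, ?_⟩
          · simp at hlen ⊢; omega
          · intro t ht
            simp only [List.mem_cons] at ht
            rcases ht with rfl | ht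
            · exact Valid.node t1 t2 t3 t4 (hval t1 (by simp)) (hval t2 (by simp))
                (hval t3 (by simp)) (hval t4 (by simp))
            · exact hval t (by simp [ht])
          · subst hx
            simp only [List.flatten_cons] at heq ⊢
            rw [heq]
            simp
      · rw [chomp, if_neg hx] at h
        obtain ⟨ts, hlen, hval, heq⟩ := ih m r h
        refine ⟨[c] :: ts, by simp [hlen], ?_, by simp [heq]⟩
        intro t ht
        simp only [List.mem_cons] at ht
        rcases ht with rfl | ht
        · exact Valid.leaf c hx
        · exact hval t ht

theorem getD_at (u : List Char) (c : Char) (v : List Char) :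
    PySem.List.pyGetD (u ++ c :: v) ((u.length : Int)) ' ' = c := by
  simp [PySem.List.pyGetD_natCast, List.getD_eq_getElem?_getD]

theorem loopA_skip (l : List Char) : ∀ (t : List Char), Valid t → ∀ (u v : List Char),
    l = u ++ t ++ v → ∀ (q : List (List Char)) (cnt s P : Int), P = u.length → 1 ≤ cnt →
    (PySem.List.pyRange P (P + t.length) 1).foldl (fA l) (q, cnt, s) = (q, cnt - 1, s) := by
  intro t hv
  induction hv with
  | leaf c hc =>
    intro u v hl q cnt s P hP hcnt
    have hT : ((([c] : List Char).length : Nat) : Int) = 1 := by simp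
    rw [hT, PySem.List.pyRange_one_singleton]
    have hl' : l = u ++ c :: v := by rw [hl]; simp
    simp only [List.foldl_cons, List.foldl_nil, fA, hP, hl', getD_at]
    rw [if_neg hc, if_neg (by omega)]
  | node a b c d ha hb hc hd iha ihb ihc ihd =>
    intro u v hl q cnt s P hP hcnt
    have hT : ((('x' :: (a ++ b ++ c ++ d) : List Char).length : Nat) : Int)
        = 1 + a.length + b.length + c.length + d.length := by
      push_cast [List.length_cons, List.length_append]; ring
    rw [hT]
    rw [PySem.List.pyRange_one_append P (P + 1)
      (P + (1 + a.length + b.length + c.length + d.length)) (by omega) (by omega)]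
    rw [PySem.List.pyRange_one_append (P + 1) (P + 1 + a.length)
      (P + (1 + a.length + b.length + c.length + d.length)) (by omega) (by omega)]
    rw [PySem.List.pyRange_one_append (P + 1 + a.length) (P + 1 + a.length + b.length)
      (P + (1 + a.length + b.length + c.length + d.length)) (by omega) (by omega)]
    rw [PySem.List.pyRange_one_append (P + 1 + a.length + b.length)
      (P + 1 + a.length + b.length + c.length)
      (P + (1 + a.length + b.length + c.length + d.length)) (by omega) (by omega)]
    rw [PySem.List.pyRange_one_singleton]
    simp only [List.foldl_append, List.foldl_cons, List.foldl_nil]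
    have hl' : l = u ++ 'x' :: (a ++ (b ++ (c ++ (d ++ v)))) := by rw [hl]; simp
    have hstep : fA l (q, cnt, s) P = (q, cnt + 3, s) := by
      simp only [fA, hP, hl', getD_at]
      simp
    rw [hstep]
    rw [iha (u ++ ['x']) (b ++ c ++ d ++ v) (by rw [hl]; simp) q (cnt + 3) s (P + 1)
      (by simp; omega) (by omega)]
    rw [ihb (u ++ 'x' :: a) (c ++ d ++ v) (by rw [hl]; simp) q (cnt + 3 - 1) s (P + 1 + a.length)
      (by simp; push_cast; omega) (by omega)]
    rw [ihc (u ++ 'x' :: (a ++ b)) (d ++ v) (by rw [hl]; simp) q (cnt + 3 - 1 - 1) s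
      (P + 1 + a.length + b.length) (by simp; push_cast; omega) (by omega)]
    have hend : P + (1 + (a.length : Int) + b.length + c.length + d.length)
        = P + 1 + a.length + b.length + c.length + d.length := by ring
    rw [hend]
    rw [ihd (u ++ 'x' :: (a ++ b ++ c)) v (by rw [hl]; simp) q (cnt + 3 - 1 - 1 - 1) s
      (P + 1 + a.length + b.length + c.length) (by simp; push_cast; omega) (by omega)]
    have h5 : cnt + 3 - 1 - 1 - 1 - 1 = cnt - 1 := by ring
    rw [h5]

theorem loopA_take (l : List Char) : ∀ (t : List Char), Valid t → ∀ (u v : List Char),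
    l = u ++ t ++ v → ∀ (q : List (List Char)) (s P : Int), P = u.length →
    (PySem.List.pyRange P (P + t.length) 1).foldl (fA l) (q, 0, s)
      = (q ++ [PySem.List.slice l (some s) (some (P + t.length))], 0, P + t.length) := by
  intro t hv
  induction hv with
  | leaf c hc =>
    intro u v hl q s P hP
    have hT : ((([c] : List Char).length : Nat) : Int) = 1 := by simp
    rw [hT, PySem.List.pyRange_one_singleton]
    have hl' : l = u ++ c :: v := by rw [hl]; simp
    simp only [List.foldl_cons, List.foldl_nil, fA, hP, hl', getD_at]
    rw [if_neg hc]
    simp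
  | node a b c d ha hb hc hd iha ihb ihc ihd =>
    intro u v hl q s P hP
    have hT : ((('x' :: (a ++ b ++ c ++ d) : List Char).length : Nat) : Int)
        = 1 + a.length + b.length + c.length + d.length := by
      push_cast [List.length_cons, List.length_append]; ring
    rw [hT]
    rw [PySem.List.pyRange_one_append P (P + 1)
      (P + (1 + a.length + b.length + c.length + d.length)) (by omega) (by omega)]
    rw [PySem.List.pyRange_one_append (P + 1) (P + 1 + a.length)
      (P + (1 + a.length + b.length + c.length + d.length)) (by omega) (by omega)]
    rw [PySem.List.pyRange_one_append (P + 1 + a.length) (P + 1 + a.length + b.length)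
      (P + (1 + a.length + b.length + c.length + d.length)) (by omega) (by omega)]
    rw [PySem.List.pyRange_one_append (P + 1 + a.length + b.length)
      (P + 1 + a.length + b.length + c.length)
      (P + (1 + a.length + b.length + c.length + d.length)) (by omega) (by omega)]
    rw [PySem.List.pyRange_one_singleton]
    simp only [List.foldl_append, List.foldl_cons, List.foldl_nil]
    have hl' : l = u ++ 'x' :: (a ++ (b ++ (c ++ (d ++ v)))) := by rw [hl]; simp
    have hstep : fA l (q, 0, s) P = (q, (0 : Int) + 3, s) := by
      simp only [fA, hP, hl', getD_at]
      simp
    rw [hstep]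
    rw [loopA_skip l a ha (u ++ ['x']) (b ++ c ++ d ++ v) (by rw [hl]; simp) q ((0 : Int) + 3) s
      (P + 1) (by simp; omega) (by omega)]
    rw [loopA_skip l b hb (u ++ 'x' :: a) (c ++ d ++ v) (by rw [hl]; simp) q ((0 : Int) + 3 - 1) s
      (P + 1 + a.length) (by simp; omega) (by omega)]
    rw [loopA_skip l c hc (u ++ 'x' :: (a ++ b)) (d ++ v) (by rw [hl]; simp) q
      ((0 : Int) + 3 - 1 - 1) s (P + 1 + a.length + b.length) (by simp; omega) (by omega)]
    have h0 : (0 : Int) + 3 - 1 - 1 - 1 = 0 := by ring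
    rw [h0]
    have hend : P + (1 + (a.length : Int) + b.length + c.length + d.length)
        = P + 1 + a.length + b.length + c.length + d.length := by ring
    rw [hend]
    rw [ihd (u ++ 'x' :: (a ++ b ++ c)) v (by rw [hl]; simp) q s
      (P + 1 + a.length + b.length + c.length) (by simp; omega)]

theorem loopA_prefix (l : List Char) : ∀ (idxs : List Int) (st : StA),
    ∃ e, (idxs.foldl (fA l) st).1 = st.1 ++ e := by
  intro idxs
  induction idxs with
  | nil => intro st; exact ⟨[], by simp⟩
  | cons i rest ih =>
    intro st
    obtain ⟨e, he⟩ := ih (fA l st i)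
    rw [List.foldl_cons, he]
    unfold fA
    split_ifs <;> simp

theorem slice_block (u t v : List Char) (P E : Int) (hP : P = u.length)
    (hE : E = P + t.length) :
    PySem.List.slice (u ++ t ++ v) (some P) (some E) = t := by
  have h2 : E = ((u.length + t.length : Nat) : Int) := by push_cast; omega
  rw [hP, h2, PySem.List.slice_natCast]
  rw [List.append_assoc, List.drop_left]
  simp

theorem pyGetD_cons4 (a b c d : List Char) (e : List (List Char)) :
    PySem.List.pyGetD (a :: b :: c :: d :: e) 0 [] = a ∧
    PySem.List.pyGetD (a :: b :: c :: d :: e) 1 [] = b ∧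
    PySem.List.pyGetD (a :: b :: c :: d :: e) 2 [] = c ∧
    PySem.List.pyGetD (a :: b :: c :: d :: e) 3 [] = d := by
  refine ⟨?_, ?_, ?_, ?_⟩ <;>
    [rw [show (0:Int) = ((0:Nat):Int) from by norm_num];
     rw [show (1:Int) = ((1:Nat):Int) from by norm_num];
     rw [show (2:Int) = ((2:Nat):Int) from by norm_num];
     rw [show (3:Int) = ((3:Nat):Int) from by norm_num]] <;>
    rw [PySem.List.pyGetD_natCast] <;> simp

theorem goA_node (h : Char) (a b c d g : List Char) (ha : Valid a) (hb : Valid b) (hc : Valid c)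
    (hd : Valid d) :
    goA (h :: (a ++ b ++ c ++ d ++ g))
      = 'x' :: (goA c ++ (goA d ++ (goA a ++ goA b))) := by
  set l : List Char := h :: (a ++ b ++ c ++ d ++ g) with hldef
  have hn : ((l.length : Nat) : Int)
      = 1 + a.length + b.length + c.length + d.length + g.length := by
    rw [hldef]; push_cast [List.length_cons, List.length_append]; ring
  have ha1 := ha.length_pos
  have hlen1 : ¬ (l.length = 1) := by
    have : l.length = a.length + b.length + c.length + d.length + g.length + 1 := by
      rw [hldef]; simp [List.length_append]; omega
    omega
  have sa : PySem.List.slice l (some 1) (some (1 + (a.length : Int))) = a := by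
    rw [show l = [h] ++ a ++ (b ++ c ++ d ++ g) from by rw [hldef]; simp]
    exact slice_block _ _ _ _ _ (by simp) (by simp)
  have sb : PySem.List.slice l (some (1 + (a.length : Int)))
      (some (1 + (a.length : Int) + b.length)) = b := by
    rw [show l = (h :: a) ++ b ++ (c ++ d ++ g) from by rw [hldef]; simp]
    exact slice_block _ _ _ _ _ (by simp; omega) (by push_cast; ring)
  have sc : PySem.List.slice l (some (1 + (a.length : Int) + b.length))
      (some (1 + (a.length : Int) + b.length + c.length)) = c := by
    rw [show l = (h :: (a ++ b)) ++ c ++ (d ++ g) from by rw [hldef]; simp]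
    exact slice_block _ _ _ _ _ (by simp; push_cast; ring) (by push_cast; ring)
  have sd : PySem.List.slice l (some (1 + (a.length : Int) + b.length + c.length))
      (some (1 + (a.length : Int) + b.length + c.length + d.length)) = d := by
    rw [show l = (h :: (a ++ b ++ c)) ++ d ++ g from by rw [hldef]; simp]
    exact slice_block _ _ _ _ _ (by simp; push_cast; ring) (by push_cast; ring)
  have hq : ∃ e, (loopA l).1 = a :: b :: c :: d :: e := by
    unfold loopA
    rw [hn]
    rw [PySem.List.pyRange_one_append 1 (1 + a.length)
      (1 + a.length + b.length + c.length + d.length + g.length) (by omega) (by omega)]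
    rw [PySem.List.pyRange_one_append (1 + a.length) (1 + a.length + b.length)
      (1 + a.length + b.length + c.length + d.length + g.length) (by omega) (by omega)]
    rw [PySem.List.pyRange_one_append (1 + a.length + b.length)
      (1 + a.length + b.length + c.length)
      (1 + a.length + b.length + c.length + d.length + g.length) (by omega) (by omega)]
    rw [PySem.List.pyRange_one_append (1 + a.length + b.length + c.length)
      (1 + a.length + b.length + c.length + d.length)
      (1 + a.length + b.length + c.length + d.length + g.length) (by omega) (by omega)]
    simp only [List.foldl_append]
    rw [loopA_take l a ha [h] (b ++ c ++ d ++ g) (by rw [hldef]; simp) [] 1 1 (by simp)]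
    rw [sa, List.nil_append]
    rw [loopA_take l b hb (h :: a) (c ++ d ++ g) (by rw [hldef]; simp) [a]
      (1 + (a.length : Int)) (1 + (a.length : Int)) (by simp; omega)]
    rw [sb]
    rw [loopA_take l c hc (h :: (a ++ b)) (d ++ g) (by rw [hldef]; simp) ([a] ++ [b])
      (1 + (a.length : Int) + b.length) (1 + (a.length : Int) + b.length)
      (by simp; push_cast; omega)]
    rw [sc]
    rw [loopA_take l d hd (h :: (a ++ b ++ c)) g (by rw [hldef]; simp) ([a] ++ [b] ++ [c])
      (1 + (a.length : Int) + b.length + c.length) (1 + (a.length : Int) + b.length + c.length)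
      (by simp; push_cast; omega)]
    rw [sd]
    obtain ⟨e, he⟩ := loopA_prefix l
      (PySem.List.pyRange (1 + (a.length : Int) + b.length + c.length + d.length)
        (1 + a.length + b.length + c.length + d.length + g.length) 1)
      ([a] ++ [b] ++ [c] ++ [d], 0, 1 + (a.length : Int) + b.length + c.length + d.length)
    exact ⟨e, by rw [he]; simp⟩
  obtain ⟨e, hq⟩ := hq
  obtain ⟨g0, g1, g2, g3⟩ := pyGetD_cons4 a b c d e
  rw [goA, if_neg hlen1]
  simp only [hq]
  rw [dif_pos (by simp)]
  rw [g0, g1, g2, g3]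

theorem goB_run (t : List Char) (hv : Valid t) :
    ∀ (stack : List (List (List Char))) (rest : List Char), stack ≠ [] →
      goB stack (t ++ rest) =
        (let r := combineB (goA t) stack
         let st' := match r.2 with
           | top :: others => (top ++ [r.1]) :: others
           | [] => [[r.1]]
         if st'.length = 1 ∧ (st'.headD []).length = 4 then
           'x' :: (PySem.List.pyGetD (st'.headD []) 2 [] ++ (PySem.List.pyGetD (st'.headD []) 3 [] ++
                   (PySem.List.pyGetD (st'.headD []) 0 [] ++ PySem.List.pyGetD (st'.headD []) 1 [])))
         else goB st' rest) := by
  induction hv with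
  | leaf c hc =>
    intro stack rest hne
    have hA : goA [c] = [c] := by rw [goA]; simp
    rw [hA]
    simp only [List.cons_append, List.nil_append, goB, if_neg hc]
  | node a b c d ha hb hc hd iha ihb ihc ihd =>
    intro stack rest hne
    obtain ⟨s1, srest, rfl⟩ : ∃ s1 srest, stack = s1 :: srest := by
      cases stack with
      | nil => exact absurd rfl hne
      | cons s1 srest => exact ⟨s1, srest, rfl⟩
    have hA : goA ('x' :: (a ++ b ++ c ++ d)) = 'x' :: (goA c ++ (goA d ++ (goA a ++ goA b))) := by
      have := goA_node 'x' a b c d [] ha hb hc hd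
      simpa using this
    rw [hA]
    show goB (s1 :: srest) ('x' :: ((a ++ b ++ c ++ d) ++ rest)) = _
    rw [show goB (s1 :: srest) ('x' :: ((a ++ b ++ c ++ d) ++ rest))
        = goB ([] :: s1 :: srest) ((a ++ b ++ c ++ d) ++ rest) from by simp [goB]]
    rw [show (a ++ b ++ c ++ d) ++ rest = a ++ (b ++ (c ++ (d ++ rest))) from by simp]
    rw [iha ([] :: s1 :: srest) (b ++ (c ++ (d ++ rest))) (by simp)]
    rw [show combineB (goA a) ([] :: s1 :: srest) = (goA a, [] :: s1 :: srest) from by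
      rw [combineB]; simp]
    dsimp only
    simp only [List.cons_append, List.nil_append]
    rw [if_neg (by rintro ⟨h1, -⟩; simp only [List.length_cons] at h1; omega)]
    rw [ihb ([goA a] :: s1 :: srest) (c ++ (d ++ rest)) (by simp)]
    rw [show combineB (goA b) ([goA a] :: s1 :: srest) = (goA b, [goA a] :: s1 :: srest) from by
      rw [combineB]; simp]
    dsimp only
    simp only [List.cons_append, List.nil_append]
    rw [if_neg (by rintro ⟨h1, -⟩; simp only [List.length_cons] at h1; omega)]
    rw [ihc ([goA a, goA b] :: s1 :: srest) (d ++ rest) (by simp)]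
    rw [show combineB (goA c) ([goA a, goA b] :: s1 :: srest)
        = (goA c, [goA a, goA b] :: s1 :: srest) from by rw [combineB]; simp]
    dsimp only
    simp only [List.cons_append, List.nil_append]
    rw [if_neg (by rintro ⟨h1, -⟩; simp only [List.length_cons] at h1; omega)]
    rw [ihd ([goA a, goA b, goA c] :: s1 :: srest) rest (by simp)]
    have hcomb : combineB (goA d) ([goA a, goA b, goA c] :: s1 :: srest)
        = combineB ('x' :: (goA c ++ (goA d ++ (goA a ++ goA b)))) (s1 :: srest) := by
      rw [combineB]
      rw [if_pos (by simp)]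
      obtain ⟨g0, g1, g2, g3⟩ := pyGetD_cons4 (goA a) (goA b) (goA c) (goA d) []
      simp only [List.cons_append, List.nil_append]
      rw [g0, g1, g2, g3]
    rw [hcomb]

theorem main_spec (tree : String) (hpre : Pre_turnOver tree) :
    turnOver tree = turnOver_alt tree := by
  rcases hpre with h1 | hch
  · unfold turnOver turnOver_alt
    rw [if_pos h1, goA, if_pos h1]
    simp
  · obtain ⟨h, rest, hrest⟩ : ∃ h rest, tree.toList = h :: rest := by
      cases htl : tree.toList with
      | nil => rw [htl] at hch; simp [chomp] at hch
      | cons c cs => exact ⟨c, cs, rfl⟩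
    rw [hrest] at hch
    simp only [List.tail_cons] at hch
    obtain ⟨r, hr⟩ := Option.isSome_iff_exists.mp hch
    obtain ⟨ts, hlen, hval, heq⟩ := chomp_sound rest 4 r hr
    match ts, hlen with
    | [a, b, c, d], _ =>
      have ha := hval a (by simp)
      have hb := hval b (by simp)
      have hc := hval c (by simp)
      have hd := hval d (by simp)
      have hl : tree.toList = h :: (a ++ b ++ c ++ d ++ r) := by
        rw [hrest, heq]; simp
      have hlnot1 : ¬ (tree.toList.length = 1) := by
        have h1 := ha.length_pos
        have : tree.toList.length
            = a.length + b.length + c.length + d.length + r.length + 1 := by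
          rw [hl]; simp [List.length_append]; omega
        omega
      have hAside : goA tree.toList = 'x' :: (goA c ++ (goA d ++ (goA a ++ goA b))) := by
        rw [hl]; exact goA_node h a b c d r ha hb hc hd
      have htail : PySem.List.slice tree.toList (some 1) none
          = a ++ (b ++ (c ++ (d ++ r))) := by
        rw [PySem.List.slice_from_one, hl]; simp
      have hBside : goB [[]] (a ++ (b ++ (c ++ (d ++ r))))
          = 'x' :: (goA c ++ (goA d ++ (goA a ++ goA b))) := by
        rw [goB_run a ha [[]] (b ++ (c ++ (d ++ r))) (by simp)]
        rw [show combineB (goA a) [[]] = (goA a, [[]]) from by rw [combineB]]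
        dsimp only
        simp only [List.nil_append]
        rw [if_neg (by
          rintro ⟨-, h2⟩
          simp only [List.headD_cons, List.length_cons, List.length_nil] at h2
          omega)]
        rw [goB_run b hb [[goA a]] (c ++ (d ++ r)) (by simp)]
        rw [show combineB (goA b) [[goA a]] = (goA b, [[goA a]]) from by rw [combineB]]
        dsimp only
        simp only [List.cons_append, List.nil_append]
        rw [if_neg (by
          rintro ⟨-, h2⟩
          simp only [List.headD_cons, List.length_cons, List.length_nil] at h2
          omega)]
        rw [goB_run c hc [[goA a, goA b]] (d ++ r) (by simp)]
        rw [show combineB (goA c) [[goA a, goA b]] = (goA c, [[goA a, goA b]]) from by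
          rw [combineB]]
        dsimp only
        simp only [List.cons_append, List.nil_append]
        rw [if_neg (by
          rintro ⟨-, h2⟩
          simp only [List.headD_cons, List.length_cons, List.length_nil] at h2
          omega)]
        rw [goB_run d hd [[goA a, goA b, goA c]] r (by simp)]
        rw [show combineB (goA d) [[goA a, goA b, goA c]] = (goA d, [[goA a, goA b, goA c]]) from by
          rw [combineB]]
        dsimp only
        simp only [List.cons_append, List.nil_append]
        rw [if_pos (by simp)]
        obtain ⟨g0, g1, g2, g3⟩ := pyGetD_cons4 (goA a) (goA b) (goA c) (goA d) []
        simp only [List.headD_cons]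
        rw [g0, g1, g2, g3]
      unfold turnOver turnOver_alt
      rw [if_neg hlnot1, hAside, htail, hBside]

-- ===== VERDICT (by name: the statement is the Claim_ definition above) =====
theorem turnOver_spec : Claim_equal_turnOver := by
  intro tree _ hpre
  unfold Spec_turnOver
  exact main_spec tree hpre
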